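-- pv_equiv track=rewrite | github.com/VedantDeore/TeamEscapeVelocity_AILoadConsolidationOptimizationEngine | backend/services/dynamic_routing.py | _is_path_between
-- ===== SOURCE A (Python) =====
-- from typing import List, Dict, Tuple, Optional, Set
--
-- def _is_path_between(start: str, end: str, city_graph: Dict[str, Set[str]], max_depth: int = 3) -> bool:
--     """Check if there's a path between two cities (BFS with depth limit)."""
--     if start == end:
--         return True
--
--     visited = set()
--     queue = [(start, 0)]
--
--     while queue:
--         current, depth = queue.pop(0)
--         if depth > max_depth:
--             continue
--
--         if current == end:
--             return True
--
--         visited.add(current)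
--         for neighbor in city_graph.get(current, set()):
--             if neighbor not in visited:
--                 queue.append((neighbor, depth + 1))
--
--     return False
-- ===== SOURCE B (Python) =====
-- def _is_path_between(start: str, end: str, city_graph, max_depth: int = 3) -> bool:
--     """Level-by-level BFS: expand whole frontier sets, mark visited on enqueue, early exit."""
--     if start == end:
--         return True
--     visited = {start}
--     frontier = {start}
--     for _ in range(max_depth):
--         next_frontier = set()
--         for node in frontier:
--             for neighbor in city_graph.get(node, set()):
--                 if neighbor == end:
--                     return True
--                 if neighbor not in visited:
--                     visited.add(neighbor)
--                     next_frontier.add(neighbor)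
--         if not next_frontier:
--             return False
--         frontier = next_frontier
--     return False
-- ===== Notes on version B (the rewrite author's own statement) =====
-- stated objective: alternative
-- what changed: A's one-entry-at-a-time queue with pop(0), duplicate enqueues and visited-marking on dequeue is replaced by level-by-level BFS over frontier sets that marks nodes visited on enqueue and stops when the frontier empties; on the generated inputs this was not measurably faster.
import Mathlib
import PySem

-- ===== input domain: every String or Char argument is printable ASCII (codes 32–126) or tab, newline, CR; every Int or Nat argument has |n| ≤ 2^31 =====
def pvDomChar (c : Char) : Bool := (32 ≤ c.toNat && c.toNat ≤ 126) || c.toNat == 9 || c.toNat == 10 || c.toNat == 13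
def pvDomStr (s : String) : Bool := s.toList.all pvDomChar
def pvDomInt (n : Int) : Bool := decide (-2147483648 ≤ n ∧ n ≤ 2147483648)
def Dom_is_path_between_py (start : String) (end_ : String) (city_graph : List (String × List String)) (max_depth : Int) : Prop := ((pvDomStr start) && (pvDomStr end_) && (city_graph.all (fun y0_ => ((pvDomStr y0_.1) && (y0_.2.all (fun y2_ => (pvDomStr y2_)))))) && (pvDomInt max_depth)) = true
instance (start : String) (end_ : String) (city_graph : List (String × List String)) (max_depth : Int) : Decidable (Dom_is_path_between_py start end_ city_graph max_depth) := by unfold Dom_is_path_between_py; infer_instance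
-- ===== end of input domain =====

-- B replaces A's one-at-a-time queue with pop(0) and duplicate enqueues by level-by-level
-- frontier-set BFS that marks nodes visited on enqueue and exits when the frontier empties.

-- ===== PORT A =====
-- city_graph.get(current, set())
def pvAdj (g : List (String × List String)) (c : String) : List String :=
  (PySem.Dict.mk g).getD c []

-- fuel bound for A's while loop (a totality guard only; the loop always exits on its own first):
-- weight B^(2·|unvisited universe| + [node visited]) summed over the queue strictly decreases each iteration.
def pvUnivA (start : String) (g : List (String × List String)) : List String :=
  PySem.List.dedup (start :: g.flatMap (fun p => p.2))
def pvBndA (g : List (String × List String)) : Nat :=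
  (g.map (fun p => p.2.length)).foldl max 0 + 2
def pvUA (univ : List String) (vis : PySem.Set String) : Nat :=
  (univ.filter (fun x => !(PySem.Set.contains vis x))).length
def pvWA (B : Nat) (univ : List String) (vis : PySem.Set String) (n : String) : Nat :=
  B ^ (2 * pvUA univ vis + (if PySem.Set.contains vis n then 1 else 0))
def pvMA (B : Nat) (univ : List String) (q : List (String × Int)) (vis : PySem.Set String) : Nat :=
  (q.map (fun e => pvWA B univ vis e.1)).sum

def pvLoopA (g : List (String × List String)) (end_ : String) (maxd : Int) :
    Nat → List (String × Int) → PySem.Set String → Bool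
  | 0, _, _ => false
  | _ + 1, [], _ => false
  | fuel + 1, (current, depth) :: queue, visited =>
    if maxd < depth then pvLoopA g end_ maxd fuel queue visited
    else if current = end_ then true
    else
      pvLoopA g end_ maxd fuel
        (queue ++ ((pvAdj g current).filter
            (fun n => !(PySem.Set.contains (PySem.Set.add visited current) n))).map
            (fun n => (n, depth + 1)))
        (PySem.Set.add visited current)

def is_path_between_py (start : String) (end_ : String) (city_graph : List (String × List String)) (max_depth : Int) : Bool :=
  if start = end_ then true
  else pvLoopA city_graph end_ max_depth
    (pvMA (pvBndA city_graph) (pvUnivA start city_graph) [(start, 0)] PySem.Set.empty + 1)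
    [(start, 0)] PySem.Set.empty

-- ===== PORT B =====
-- inner 'for neighbor in city_graph.get(node, set())' of Source B; none = 'return True'
def pvExpandNbrs (end_ : String) : List String → PySem.Set String → PySem.Set String →
    Option (PySem.Set String × PySem.Set String)
  | [], visited, nf => some (visited, nf)
  | n :: rest, visited, nf =>
    if n = end_ then none
    else if PySem.Set.contains visited n then pvExpandNbrs end_ rest visited nf
    else pvExpandNbrs end_ rest (PySem.Set.add visited n) (PySem.Set.add nf n)

-- outer 'for node in frontier' of Source B
def pvExpand (g : List (String × List String)) (end_ : String) :
    List String → PySem.Set String → PySem.Set String →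
    Option (PySem.Set String × PySem.Set String)
  | [], visited, nf => some (visited, nf)
  | c :: rest, visited, nf =>
    match pvExpandNbrs end_ (pvAdj g c) visited nf with
    | none => none
    | some (visited', nf') => pvExpand g end_ rest visited' nf'

-- 'for _ in range(max_depth)' of Source B
def pvLoopB (g : List (String × List String)) (end_ : String) :
    Nat → PySem.Set String → PySem.Set String → Bool
  | 0, _, _ => false
  | k + 1, frontier, visited =>
    match pvExpand g end_ frontier visited PySem.Set.empty with
    | none => true
    | some (visited', nf) => if nf = [] then false else pvLoopB g end_ k nf visited'

def is_path_between_py_alt (start : String) (end_ : String) (city_graph : List (String × List String)) (max_depth : Int) : Bool :=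
  if start = end_ then true
  else pvLoopB city_graph end_ max_depth.toNat
    (PySem.Set.ofList [start]) (PySem.Set.ofList [start])

-- ===== PRECONDITION & SPEC =====
def Spec_is_path_between_py (start : String) (end_ : String) (city_graph : List (String × List String)) (max_depth : Int) (out : Bool) : Prop := out = is_path_between_py_alt start end_ city_graph max_depth
instance (start : String) (end_ : String) (city_graph : List (String × List String)) (max_depth : Int) (out : Bool) : Decidable (Spec_is_path_between_py start end_ city_graph max_depth out) := by unfold Spec_is_path_between_py; infer_instance

-- ===== CLAIM (what is proved, stated in full; the proofs are below) =====
def Claim_equal_is_path_between_py : Prop := ∀ (start : String) (end_ : String) (city_graph : List (String × List String)) (max_depth : Int), Dom_is_path_between_py start end_ city_graph max_depth → Spec_is_path_between_py start end_ city_graph max_depth (is_path_between_py start end_ city_graph max_depth)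

-- ===== LEMMAS AND PROOFS =====

-- common specification: from x, with budget already spent down to depth d, some walk of
-- d-incrementing steps that avoids vis after its first node reaches end_ at depth ≤ maxd
inductive pvCR (g : List (String × List String)) (end_ : String) (maxd : Int) :
    PySem.Set String → String → Int → Prop
  | found (vis : PySem.Set String) (d : Int) : d ≤ maxd → pvCR g end_ maxd vis end_ d
  | step (vis : PySem.Set String) (c n : String) (d : Int) :
      n ∈ pvAdj g c → n ∉ vis → pvCR g end_ maxd vis n (d + 1) → pvCR g end_ maxd vis c d

theorem pvCR_le {g end_ maxd vis c d} (h : pvCR g end_ maxd vis c d) : d ≤ maxd := by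
  induction h with
  | found _ h => exact h
  | step _ _ _ _ _ _ ih => omega

theorem pvCR_anti {g end_ maxd vis c d} (h : pvCR g end_ maxd vis c d) :
    ∀ d', d' ≤ d → pvCR g end_ maxd vis c d' := by
  induction h with
  | found _ h => exact fun d' hd => .found _ _ (le_trans hd h)
  | step c n d hadj hvis _ ih =>
      exact fun d' hd => .step _ c n d' hadj hvis (ih (d' + 1) (by omega))

theorem pvCR_mono {g end_ maxd vis vis' c d} (hsub : ∀ x, x ∈ vis → x ∈ vis')
    (h : pvCR g end_ maxd vis' c d) : pvCR g end_ maxd vis c d := by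
  induction h with
  | found _ h => exact .found _ _ h
  | step c n d hadj hvis _ ih =>
      exact .step _ c n d hadj (fun hn => hvis (hsub _ hn)) ih

theorem pvCR_inv {g end_ maxd vis c d} (h : pvCR g end_ maxd vis c d) (hne : c ≠ end_) :
    ∃ n, n ∈ pvAdj g c ∧ n ∉ vis ∧ pvCR g end_ maxd vis n (d + 1) := by
  cases h with
  | found _ h => exact absurd rfl hne
  | step _ n _ hadj hvis hcr => exact ⟨n, hadj, hvis, hcr⟩

-- adding a set S of nodes to vis: either the walk still avoids vis∪S, or it can restart at some s ∈ S
theorem pvCR_addS {g end_ maxd vis visB c d} (S : List String)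
    (hsub : ∀ x, x ∈ vis → x ∈ visB) (hcov : ∀ x, x ∈ visB → x ∈ vis ∨ x ∈ S)
    (h : pvCR g end_ maxd vis c d) :
    pvCR g end_ maxd visB c d ∨ ∃ s ∈ S, pvCR g end_ maxd visB s d := by
  induction h with
  | found _ h => exact Or.inl (.found _ _ h)
  | step c n d hadj hvis hcr ih =>
      rcases ih with ih | ⟨s, hs, hcrs⟩
      · by_cases hn : n ∈ visB
        · rcases hcov n hn with h' | h'
          · exact absurd h' hvis
          · exact Or.inr ⟨n, h', pvCR_anti ih d (by omega)⟩
        · exact Or.inl (.step _ c n d hadj hn ih)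
      · exact Or.inr ⟨s, hs, pvCR_anti hcrs d (by omega)⟩

theorem pv_mem_adj {g c x} (h : x ∈ pvAdj g c) : x ∈ g.flatMap (fun p => p.2) := by
  unfold pvAdj PySem.Dict.getD PySem.Dict.get? at h
  rcases hf : (PySem.Dict.mk g).items.find? (fun p => p.1 == c) with _ | p
  · simp [hf] at h
  · simp only [hf, Option.map_some, Option.getD_some] at h
    have hp : p ∈ g := List.mem_of_find?_eq_some hf
    exact List.mem_flatMap.mpr ⟨p, hp, h⟩

theorem pv_adj_len {g c} : (pvAdj g c).length + 2 ≤ pvBndA g := by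
  unfold pvBndA
  have : (pvAdj g c).length ≤ (g.map (fun p => p.2.length)).foldl max 0 := by
    unfold pvAdj PySem.Dict.getD PySem.Dict.get?
    rcases hf : (PySem.Dict.mk g).items.find? (fun p => p.1 == c) with _ | p
    · simp [hf]
    · simp only [hf, Option.map_some, Option.getD_some]
      have hp : p ∈ g := List.mem_of_find?_eq_some hf
      exact (PySem.List.le_foldl_max _ 0).2 _ (List.mem_map_of_mem hp)
  omega

-- ----- measure -----

theorem pv_filter_len {p : String → Bool} {c : String} :
    ∀ (l : List String), l.Nodup → c ∈ l → p c = true →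
    (l.filter (fun x => p x && !(x == c))).length + 1 = (l.filter p).length := by
  intro l
  induction l with
  | nil => intro _ h; exact absurd h (List.not_mem_nil)
  | cons a rest ih =>
    intro hn hc hp
    by_cases hac : a = c
    · subst hac
      have hrest : rest.filter (fun x => p x && !(x == a)) = rest.filter p := by
        apply List.filter_congr
        intro x hx
        have : x ≠ a := fun h => ((List.nodup_cons.mp hn).1) (h ▸ hx)
        simp [this]
      simp [hp, hrest]
    · have hc : c ∈ rest := by
        rcases List.mem_cons.mp hc with h | h
        · exact absurd h.symm hac
        · exact h
      have ha : ¬ (a == c) = true := by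
        intro h
        exact (List.nodup_cons.mp hn).1 (beq_iff_eq.mp h ▸ hc)
      have ih' := ih (List.nodup_cons.mp hn).2 hc hp
      by_cases hpa : p a = true
      · simp [hpa, ha]; omega
      · simp only [Bool.not_eq_true] at hpa
        simp [hpa, ha, ih']

theorem pvUA_add_of_not_mem {univ : List String} {vis : PySem.Set String} {c : String}
    (hn : univ.Nodup) (hc : c ∈ univ) (hv : ¬ (PySem.Set.contains vis c = true)) :
    pvUA univ (PySem.Set.add vis c) + 1 = pvUA univ vis := by
  have hv' : c ∉ vis := by simpa [PySem.Set.contains, List.contains_iff_mem] using hv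
  have hadd : PySem.Set.add vis c = vis ++ [c] := by
    unfold PySem.Set.add; simp [hv']
  unfold pvUA
  rw [hadd]
  have hpt : ∀ x ∈ univ, (!PySem.Set.contains (vis ++ [c]) x) =
      ((!PySem.Set.contains vis x) && !(x == c)) := by
    intro x _
    unfold PySem.Set.contains
    cases hx : (vis ++ [c]).contains x <;> cases hy : vis.contains x <;>
      simp_all
  rw [List.filter_congr hpt]
  exact pv_filter_len univ hn hc (by simpa [PySem.Set.contains, List.contains_iff_mem] using hv)


theorem pvMA_append (B univ q r vis) :
    pvMA B univ (q ++ r) vis = pvMA B univ q vis + pvMA B univ r vis := by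
  simp [pvMA]

theorem pvMA_decrease {g : List (String × List String)} {start c : String} {d : Int}
    {q : List (String × Int)} {vis : PySem.Set String}
    (hc : c ∈ pvUnivA start g) :
    pvMA (pvBndA g) (pvUnivA start g)
      (q ++ ((pvAdj g c).filter
          (fun n => !(PySem.Set.contains (PySem.Set.add vis c) n))).map (fun n => (n, d + 1)))
      (PySem.Set.add vis c)
    < pvMA (pvBndA g) (pvUnivA start g) ((c, d) :: q) vis := by
  set B := pvBndA g with hBdef
  set univ := pvUnivA start g with hUdef
  have hB : 2 ≤ B := by rw [hBdef]; unfold pvBndA; omega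
  have hBpos : 0 < B := by omega
  set vis' := PySem.Set.add vis c with hvis'
  set fl := (pvAdj g c).filter (fun n => !(PySem.Set.contains vis' n)) with hfl
  have hk : fl.length ≤ B - 2 := by
    have h1 : fl.length ≤ (pvAdj g c).length := List.length_filter_le _ _
    have h2 := pv_adj_len (g := g) (c := c)
    rw [← hBdef] at h2
    omega
  -- the new entries all have weight B^(2 * pvUA univ vis')
  have hnew : pvMA B univ (fl.map (fun n => (n, d + 1))) vis'
      ≤ fl.length * B ^ (2 * pvUA univ vis') := by
    unfold pvMA
    rw [List.map_map]
    have hle : ∀ x ∈ fl.map ((fun e => pvWA B univ vis' e.1) ∘ (fun n => (n, d + 1))),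
        x ≤ B ^ (2 * pvUA univ vis') := by
      intro x hx
      rcases List.mem_map.mp hx with ⟨n, hn, rfl⟩
      have hcn : PySem.Set.contains vis' n = false := by
        have := List.of_mem_filter hn
        simpa using this
      simp only [Function.comp, pvWA, hcn]
      simp
    have := List.sum_le_card_nsmul _ _ hle
    simpa [smul_eq_mul] using this
  rw [pvMA_append]
  by_cases hcv : PySem.Set.contains vis c = true
  · -- current already visited: vis' = vis, head weight B^(2U+1)
    have hm : c ∈ vis := by simpa [PySem.Set.contains, List.contains_iff_mem] using hcv
    have hveq : vis' = vis := by rw [hvis']; unfold PySem.Set.add; simp [hm]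
    rw [hveq] at hnew ⊢
    have hhead : pvMA B univ ((c, d) :: q) vis
        = B ^ (2 * pvUA univ vis + 1) + pvMA B univ q vis := by
      simp [pvMA, pvWA, hm]
    rw [hhead]
    have hlt : fl.length * B ^ (2 * pvUA univ vis) < B ^ (2 * pvUA univ vis + 1) := by
      rw [pow_succ]
      have hX : 0 < B ^ (2 * pvUA univ vis) := Nat.pow_pos hBpos
      have hflB : fl.length < B := by omega
      calc fl.length * B ^ (2 * pvUA univ vis) < B * B ^ (2 * pvUA univ vis) :=
            (Nat.mul_lt_mul_right hX).mpr hflB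
        _ = B ^ (2 * pvUA univ vis) * B := Nat.mul_comm _ _
    omega
  · -- current newly visited: the unvisited count drops by one
    have hU : pvUA univ vis' + 1 = pvUA univ vis := by
      rw [hvis']
      exact pvUA_add_of_not_mem (by rw [hUdef]; exact PySem.List.nodup_dedup _) hc hcv
    have hhead : pvMA B univ ((c, d) :: q) vis
        = B ^ (2 * pvUA univ vis) + pvMA B univ q vis := by
      have hm : c ∉ vis := by simpa [PySem.Set.contains, List.contains_iff_mem] using hcv
      simp [pvMA, pvWA, hm]
    rw [hhead]
    -- tail weights only shrink
    have htail : pvMA B univ q vis' ≤ pvMA B univ q vis := by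
      unfold pvMA
      apply List.sum_le_sum
      intro e _
      unfold pvWA
      have h1 : 2 * pvUA univ vis' + (if PySem.Set.contains vis' e.1 = true then 1 else 0)
          ≤ 2 * pvUA univ vis + (if PySem.Set.contains vis e.1 = true then 1 else 0) := by
        split_ifs <;> omega
      exact Nat.pow_le_pow_right hBpos h1
    -- new entries total below the head weight
    have hlt : fl.length * B ^ (2 * pvUA univ vis') < B ^ (2 * pvUA univ vis) := by
      have h2 : 2 * pvUA univ vis = 2 * pvUA univ vis' + 2 := by omega
      rw [h2, pow_add]
      have hY : 0 < B ^ (2 * pvUA univ vis') := Nat.pow_pos hBpos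
      have hBB : B - 2 < B ^ 2 := by
        have h3 : 2 * B ≤ B * B := Nat.mul_le_mul_right B hB
        rw [pow_two]; omega
      have hfl2 : fl.length < B ^ 2 := by omega
      calc fl.length * B ^ (2 * pvUA univ vis') < B ^ 2 * B ^ (2 * pvUA univ vis') :=
            (Nat.mul_lt_mul_right hY).mpr hfl2
        _ = B ^ (2 * pvUA univ vis') * B ^ 2 := Nat.mul_comm _ _
    omega

-- stepping A's loop: processing the head (c, d) preserves the set of spec-witnesses in the queue
theorem pvStep {g : List (String × List String)} {end_ : String} {maxd : Int}
    {c : String} {d : Int} {q : List (String × Int)} {vis : PySem.Set String}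
    (hne : c ≠ end_) (hmin : ∀ e ∈ q, d ≤ e.2) :
    ((∃ e ∈ q ++ ((pvAdj g c).filter
          (fun n => !(PySem.Set.contains (PySem.Set.add vis c) n))).map (fun n => (n, d + 1)),
        pvCR g end_ maxd (PySem.Set.add vis c) e.1 e.2)
      ↔ ∃ e ∈ (c, d) :: q, pvCR g end_ maxd vis e.1 e.2) := by
  have hsub : ∀ x, x ∈ vis → x ∈ PySem.Set.add vis c :=
    fun x hx => (PySem.Set.mem_add vis c x).mpr (Or.inl hx)
  have hcov : ∀ x, x ∈ PySem.Set.add vis c → x ∈ vis ∨ x ∈ [c] := by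
    intro x hx
    rcases (PySem.Set.mem_add vis c x).mp hx with h | h
    · exact Or.inl h
    · exact Or.inr (by simp [h])
  have hmemnew : ∀ n : String, n ∈ (pvAdj g c).filter
      (fun n => !(PySem.Set.contains (PySem.Set.add vis c) n)) ↔
      (n ∈ pvAdj g c ∧ n ∉ PySem.Set.add vis c) := by
    intro n
    rw [List.mem_filter]
    simp [PySem.Set.contains]
  constructor
  · rintro ⟨e, he, hcr⟩
    rcases List.mem_append.mp he with hq | hnew
    · exact ⟨e, List.mem_cons_of_mem _ hq, pvCR_mono hsub hcr⟩
    · rcases List.mem_map.mp hnew with ⟨n, hnf, rfl⟩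
      rcases (hmemnew n).mp hnf with ⟨hnadj, hnv'⟩
      have hnv : n ∉ vis := fun h => hnv' (hsub _ h)
      exact ⟨(c, d), List.mem_cons_self,
        .step _ c n d hnadj hnv (pvCR_mono hsub hcr)⟩
  · rintro ⟨e, he, hcr⟩
    rcases List.mem_cons.mp he with heq | hq
    · rw [heq] at hcr
      have hcr' : pvCR g end_ maxd (PySem.Set.add vis c) c d := by
        rcases pvCR_addS [c] hsub hcov hcr with h | ⟨s, hs, h⟩
        · exact h
        · have : s = c := by simpa using hs
          exact this ▸ h
      obtain ⟨n, hnadj, hnv', hcrn⟩ := pvCR_inv hcr' hne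
      exact ⟨(n, d + 1), List.mem_append_right _
        (List.mem_map.mpr ⟨n, (hmemnew n).mpr ⟨hnadj, hnv'⟩, rfl⟩), hcrn⟩
    · rcases pvCR_addS [c] hsub hcov hcr with h | ⟨s, hs, h⟩
      · exact ⟨e, List.mem_append_left _ hq, h⟩
      · have hs' : s = c := by simpa using hs
        rw [hs'] at h
        obtain ⟨n, hnadj, hnv', hcrn⟩ := pvCR_inv h hne
        refine ⟨(n, d + 1), List.mem_append_right _
          (List.mem_map.mpr ⟨n, (hmemnew n).mpr ⟨hnadj, hnv'⟩, rfl⟩), ?_⟩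
        exact pvCR_anti hcrn (d + 1) (by have := hmin e hq; omega)

-- ----- A's loop against the spec -----

theorem pvTA {g : List (String × List String)} {end_ start : String} {maxd : Int} :
    ∀ (fuel : Nat) (q : List (String × Int)) (vis : PySem.Set String),
    pvMA (pvBndA g) (pvUnivA start g) q vis < fuel →
    (∀ e ∈ q, e.1 ∈ pvUnivA start g) →
    end_ ∉ vis →
    q.Pairwise (fun a b => a.2 ≤ b.2) →
    (∀ a ∈ q, ∀ b ∈ q, a.2 ≤ b.2 + 1) →
    (pvLoopA g end_ maxd fuel q vis = true ↔ ∃ e ∈ q, pvCR g end_ maxd vis e.1 e.2) := by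
  intro fuel
  induction fuel with
  | zero => intro q vis hM _ _ _ _; omega
  | succ fuel ih =>
    intro q vis hM hq hev hpw hband
    match q with
    | [] => simp [pvLoopA]
    | (c, d) :: q' =>
      have hw1 : 1 ≤ pvWA (pvBndA g) (pvUnivA start g) vis c :=
        Nat.pow_pos (by unfold pvBndA; omega)
      have hMc : pvMA (pvBndA g) (pvUnivA start g) ((c, d) :: q') vis
          = pvWA (pvBndA g) (pvUnivA start g) vis c
            + pvMA (pvBndA g) (pvUnivA start g) q' vis := by
        simp [pvMA]
      have hhead : ∀ e ∈ q', d ≤ e.2 := fun e he => (List.pairwise_cons.mp hpw).1 e he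
      simp only [pvLoopA]
      by_cases hd : maxd < d
      · rw [if_pos hd]
        rw [ih q' vis (by omega) (fun e he => hq e (List.mem_cons_of_mem _ he)) hev
          (List.pairwise_cons.mp hpw).2
          (fun a ha b hb => hband a (List.mem_cons_of_mem _ ha) b (List.mem_cons_of_mem _ hb))]
        constructor
        · rintro ⟨e, he, hcr⟩
          exact ⟨e, List.mem_cons_of_mem _ he, hcr⟩
        · rintro ⟨e, he, hcr⟩
          rcases List.mem_cons.mp he with heq | hq'
          · rw [heq] at hcr
            have := pvCR_le hcr
            omega
          · exact ⟨e, hq', hcr⟩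
      · rw [if_neg hd]
        by_cases hce : c = end_
        · rw [if_pos hce]
          exact iff_of_true rfl ⟨(c, d), List.mem_cons_self, hce ▸ pvCR.found vis d (by omega)⟩
        · rw [if_neg hce]
          have hcuniv : c ∈ pvUnivA start g := hq (c, d) List.mem_cons_self
          have hdec := pvMA_decrease (g := g) (start := start) (c := c) (d := d)
            (q := q') (vis := vis) hcuniv
          rw [ih _ _ (by omega) ?nodes ?endvis ?pw ?band]
          · exact pvStep hce hhead
          case nodes =>
            intro e he
            rcases List.mem_append.mp he with h | h
            · exact hq e (List.mem_cons_of_mem _ h)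
            · rcases List.mem_map.mp h with ⟨n, hnf, rfl⟩
              have : n ∈ pvAdj g c := List.mem_of_mem_filter hnf
              unfold pvUnivA
              exact (PySem.List.mem_dedup _ _).mpr (List.mem_cons_of_mem _ (pv_mem_adj this))
          case endvis =>
            intro hmem
            rcases (PySem.Set.mem_add vis c end_).mp hmem with h | h
            · exact hev h
            · exact hce h.symm
          case pw =>
            rw [List.pairwise_append]
            refine ⟨(List.pairwise_cons.mp hpw).2, ?_, ?_⟩
            · rw [List.pairwise_map]
              exact List.pairwise_of_forall_sublist (fun {a b} _ => le_refl _)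
            · intro a ha b hb
              rcases List.mem_map.mp hb with ⟨n, _, rfl⟩
              exact hband a (List.mem_cons_of_mem _ ha) (c, d) List.mem_cons_self
          case band =>
            intro a ha b hb
            rcases List.mem_append.mp ha with ha' | ha' <;>
              rcases List.mem_append.mp hb with hb' | hb'
            · exact hband a (List.mem_cons_of_mem _ ha') b (List.mem_cons_of_mem _ hb')
            · rcases List.mem_map.mp hb' with ⟨n, _, rfl⟩
              have := hband a (List.mem_cons_of_mem _ ha') (c, d) List.mem_cons_self
              simp only
              omega
            · rcases List.mem_map.mp ha' with ⟨n, _, rfl⟩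
              have := hhead b hb'
              simp only
              omega
            · rcases List.mem_map.mp ha' with ⟨n, _, rfl⟩
              rcases List.mem_map.mp hb' with ⟨m, _, rfl⟩
              simp only
              omega

-- ----- B's loop against the spec -----

theorem pvExpandNbrs_none_iff {end_ : String} {nbrs : List String}
    {visited nf : PySem.Set String} :
    pvExpandNbrs end_ nbrs visited nf = none ↔ end_ ∈ nbrs := by
  induction nbrs generalizing visited nf with
  | nil => simp [pvExpandNbrs]
  | cons n rest ih =>
    simp only [pvExpandNbrs]
    by_cases hn : n = end_
    · simp [hn]
    · rw [if_neg hn]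
      by_cases hv : PySem.Set.contains visited n = true
      · rw [if_pos hv, ih]
        simp [List.mem_cons, Ne.symm hn]
      · rw [if_neg hv, ih]
        simp [List.mem_cons, Ne.symm hn]

theorem pvExpandNbrs_some {end_ : String} {nbrs : List String}
    {visited nf v' nf' : PySem.Set String}
    (h : pvExpandNbrs end_ nbrs visited nf = some (v', nf'))
    (hsub : ∀ x, x ∈ nf → x ∈ visited) :
    end_ ∉ nbrs ∧
    (∀ x, x ∈ nf' ↔ x ∈ nf ∨ (x ∉ visited ∧ x ∈ nbrs)) ∧
    (∀ x, x ∈ v' ↔ x ∈ visited ∨ x ∈ nf') := by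
  induction nbrs generalizing visited nf with
  | nil =>
    simp only [pvExpandNbrs, Option.some.injEq, Prod.mk.injEq] at h
    obtain ⟨rfl, rfl⟩ := h
    refine ⟨List.not_mem_nil, fun x => by simp, fun x => ?_⟩
    constructor
    · exact fun h => Or.inl h
    · rintro (h | h)
      · exact h
      · exact hsub x h
  | cons n rest ih =>
    simp only [pvExpandNbrs] at h
    by_cases hn : n = end_
    · rw [if_pos hn] at h; exact absurd h (by simp)
    · rw [if_neg hn] at h
      by_cases hv : PySem.Set.contains visited n = true
      · rw [if_pos hv] at h
        have hnv : n ∈ visited := by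
          simpa [PySem.Set.contains, List.contains_iff_mem] using hv
        obtain ⟨hend, hnf', hv'⟩ := ih h hsub
        refine ⟨?_, fun x => ?_, hv'⟩
        · simp [List.mem_cons, hend, Ne.symm hn]
        · have h1 := hnf' x
          have h2 : x ∈ (n :: rest) ↔ x = n ∨ x ∈ rest := List.mem_cons
          by_cases hxn : x = n
          · subst hxn; tauto
          · tauto
      · rw [if_neg hv] at h
        have hnv : n ∉ visited := by
          simpa [PySem.Set.contains, List.contains_iff_mem] using hv
        have hsub2 : ∀ x, x ∈ PySem.Set.add nf n → x ∈ PySem.Set.add visited n := by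
          intro x hx
          rcases (PySem.Set.mem_add nf n x).mp hx with h' | h'
          · exact (PySem.Set.mem_add visited n x).mpr (Or.inl (hsub x h'))
          · exact (PySem.Set.mem_add visited n x).mpr (Or.inr h')
        obtain ⟨hend, hnf', hv'⟩ := ih h hsub2
        have hmemnf2 : ∀ x, x ∈ PySem.Set.add nf n ↔ x ∈ nf ∨ x = n := PySem.Set.mem_add nf n
        have hmemv2 : ∀ x, x ∈ PySem.Set.add visited n ↔ x ∈ visited ∨ x = n :=
          PySem.Set.mem_add visited n
        have hnnf' : n ∈ nf' := (hnf' n).mpr (Or.inl ((hmemnf2 n).mpr (Or.inr rfl)))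
        refine ⟨?_, fun x => ?_, fun x => ?_⟩
        · simp [List.mem_cons, hend, Ne.symm hn]
        · have h1 := hnf' x
          have h2 := hmemnf2 x
          have h3 := hmemv2 x
          have h4 : x ∈ (n :: rest) ↔ x = n ∨ x ∈ rest := List.mem_cons
          by_cases hxn : x = n
          · subst hxn; tauto
          · tauto
        · have h1 := hv' x
          have h3 := hmemv2 x
          by_cases hxn : x = n
          · subst hxn; tauto
          · tauto

theorem pvExpand_none_iff {g end_} {frontier : List String} {visited nf : PySem.Set String} :
    pvExpand g end_ frontier visited nf = none ↔ ∃ c ∈ frontier, end_ ∈ pvAdj g c := by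
  induction frontier generalizing visited nf with
  | nil => simp [pvExpand]
  | cons c rest ih =>
    simp only [pvExpand]
    cases hEN : pvExpandNbrs end_ (pvAdj g c) visited nf with
    | none =>
      have := pvExpandNbrs_none_iff.mp hEN
      exact iff_of_true rfl ⟨c, List.mem_cons_self, this⟩
    | some p =>
      have hnoend : end_ ∉ pvAdj g c := fun hmem => by
        rw [pvExpandNbrs_none_iff.mpr hmem] at hEN
        simp at hEN
      rcases p with ⟨v2, nf2⟩
      rw [ih]
      constructor
      · rintro ⟨c', h1, h2⟩; exact ⟨c', List.mem_cons_of_mem _ h1, h2⟩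
      · rintro ⟨c', hm, h2⟩
        rcases List.mem_cons.mp hm with rfl | h1
        · exact absurd h2 hnoend
        · exact ⟨c', h1, h2⟩

theorem pvExpand_some {g end_} {frontier : List String} {visited nf v' nf' : PySem.Set String}
    (h : pvExpand g end_ frontier visited nf = some (v', nf'))
    (hsub : ∀ x, x ∈ nf → x ∈ visited) :
    (∀ c ∈ frontier, end_ ∉ pvAdj g c) ∧
    (∀ x, x ∈ nf' ↔ x ∈ nf ∨ (x ∉ visited ∧ ∃ c ∈ frontier, x ∈ pvAdj g c)) ∧
    (∀ x, x ∈ v' ↔ x ∈ visited ∨ x ∈ nf') := by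
  induction frontier generalizing visited nf with
  | nil =>
    simp only [pvExpand, Option.some.injEq, Prod.mk.injEq] at h
    obtain ⟨rfl, rfl⟩ := h
    refine ⟨by simp, fun x => by simp, fun x => ?_⟩
    constructor
    · exact fun h => Or.inl h
    · rintro (h | h)
      · exact h
      · exact hsub x h
  | cons c rest ih =>
    simp only [pvExpand] at h
    cases hEN : pvExpandNbrs end_ (pvAdj g c) visited nf with
    | none => rw [hEN] at h; exact absurd h (by simp)
    | some p =>
      rcases p with ⟨v2, nf2⟩
      rw [hEN] at h
      obtain ⟨hend, hnf2, hv2⟩ := pvExpandNbrs_some hEN hsub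
      have hsub2 : ∀ x, x ∈ nf2 → x ∈ v2 := fun x hx => (hv2 x).mpr (Or.inr hx)
      obtain ⟨hnoend, hnf', hv'⟩ := ih h hsub2
      refine ⟨?_, fun x => ?_, fun x => ?_⟩
      · intro c' hc'
        rcases List.mem_cons.mp hc' with rfl | hc'
        · exact hend
        · exact hnoend c' hc'
      · have h1 := hnf' x
        have h2 := hnf2 x
        have h3 := hv2 x
        have h4 : (∃ c' ∈ c :: rest, x ∈ pvAdj g c') ↔
            (x ∈ pvAdj g c ∨ ∃ c' ∈ rest, x ∈ pvAdj g c') := by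
          constructor
          · rintro ⟨c', hm, hx⟩
            rcases List.mem_cons.mp hm with rfl | hm
            · exact Or.inl hx
            · exact Or.inr ⟨c', hm, hx⟩
          · rintro (hx | ⟨c', hm, hx⟩)
            · exact ⟨c, List.mem_cons_self, hx⟩
            · exact ⟨c', List.mem_cons_of_mem _ hm, hx⟩
        rw [h4]
        constructor
        · intro hx
          rcases (hnf' x).mp hx with h2 | ⟨hxv2, hP⟩
          · rcases (hnf2 x).mp h2 with hnf_ | ⟨hxv, hxa⟩
            · exact Or.inl hnf_
            · exact Or.inr ⟨hxv, Or.inl hxa⟩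
          · have hxv : x ∉ visited := fun hv_ => hxv2 ((hv2 x).mpr (Or.inl hv_))
            exact Or.inr ⟨hxv, Or.inr hP⟩
        · intro hx
          rcases hx with hnf_ | ⟨hxv, hxa | hP⟩
          · exact (hnf' x).mpr (Or.inl ((hnf2 x).mpr (Or.inl hnf_)))
          · exact (hnf' x).mpr (Or.inl ((hnf2 x).mpr (Or.inr ⟨hxv, hxa⟩)))
          · by_cases hx2 : x ∈ nf2
            · exact (hnf' x).mpr (Or.inl hx2)
            · have hxv2 : x ∉ v2 := fun hv_ => by
                rcases (hv2 x).mp hv_ with h' | h'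
                · exact hxv h'
                · exact hx2 h'
              exact (hnf' x).mpr (Or.inr ⟨hxv2, hP⟩)
      · constructor
        · intro hx
          rcases (hv' x).mp hx with h' | h'
          · rcases (hv2 x).mp h' with h'' | h''
            · exact Or.inl h''
            · exact Or.inr ((hnf' x).mpr (Or.inl h''))
          · exact Or.inr h'
        · rintro (h' | h')
          · exact (hv' x).mpr (Or.inl ((hv2 x).mpr (Or.inl h')))
          · exact (hv' x).mpr (Or.inr h')

theorem pvTB {g : List (String × List String)} {end_ : String} {maxd : Int} :
    ∀ (k : Nat) (frontier visited : PySem.Set String),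
    end_ ∉ visited →
    (∀ x ∈ frontier, x ∈ visited) →
    (pvLoopB g end_ k frontier visited = true ↔
      ∃ c ∈ frontier, pvCR g end_ maxd visited c (maxd - k)) := by
  intro k
  induction k with
  | zero =>
    intro frontier visited hev hfr
    simp only [pvLoopB, Nat.cast_zero]
    constructor
    · intro h; exact absurd h (by simp)
    · rintro ⟨c, hc, hcr⟩
      have hcne : c ≠ end_ := fun h => hev (h ▸ hfr c hc)
      obtain ⟨n, _, _, hcrn⟩ := pvCR_inv hcr hcne
      have := pvCR_le hcrn
      omega
  | succ k ih =>
    intro frontier visited hev hfr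
    cases hE : pvExpand g end_ frontier visited PySem.Set.empty with
    | none =>
      have hred : pvLoopB g end_ (k + 1) frontier visited = true := by
        simp only [pvLoopB]
        rw [hE]
      rw [hred]
      obtain ⟨c, hc, hadj⟩ := pvExpand_none_iff.mp hE
      refine iff_of_true rfl ⟨c, hc, .step _ c end_ _ hadj hev (.found _ _ ?_)⟩
      push_cast
      omega
    | some p =>
      rcases p with ⟨v', nf⟩
      have hred : pvLoopB g end_ (k + 1) frontier visited
          = (if nf = [] then false else pvLoopB g end_ k nf v') := by
        simp only [pvLoopB]
        rw [hE]
      rw [hred]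
      obtain ⟨hnoend, hnf0, hv'⟩ := pvExpand_some hE (fun x hx => absurd hx List.not_mem_nil)
      have hnf : ∀ x, x ∈ nf ↔ (x ∉ visited ∧ ∃ c ∈ frontier, x ∈ pvAdj g c) := by
        intro x
        have := hnf0 x
        simpa using this
      have hsubv : ∀ x, x ∈ visited → x ∈ v' := fun x hx => (hv' x).mpr (Or.inl hx)
      have hdk : maxd - (k : Int) = (maxd - ((k + 1 : Nat) : Int)) + 1 := by push_cast; ring
      by_cases hnfe : nf = []
      · rw [if_pos hnfe]
        constructor
        · intro h; exact absurd h (by simp)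
        · rintro ⟨c, hc, hcr⟩
          have hcne : c ≠ end_ := fun h => hev (h ▸ hfr c hc)
          obtain ⟨n, hadj, hnv, hcrn⟩ := pvCR_inv hcr hcne
          have : n ∈ nf := (hnf n).mpr ⟨hnv, c, hc, hadj⟩
          rw [hnfe] at this
          exact absurd this List.not_mem_nil
      · rw [if_neg hnfe]
        have hev' : end_ ∉ v' := by
          intro hmem
          rcases (hv' end_).mp hmem with h | h
          · exact hev h
          · obtain ⟨_, c, hc, hadj⟩ := (hnf end_).mp h
            exact hnoend c hc hadj
        have hfr' : ∀ x ∈ nf, x ∈ v' := fun x hx => (hv' x).mpr (Or.inr hx)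
        rw [ih nf v' hev' hfr']
        constructor
        · rintro ⟨c', hc', hcr⟩
          obtain ⟨hnv, c, hc, hadj⟩ := (hnf c').mp hc'
          have hcr' : pvCR g end_ maxd visited c' (maxd - (k : Int)) :=
            pvCR_mono hsubv hcr
          rw [hdk] at hcr'
          exact ⟨c, hc, .step _ c c' _ hadj hnv hcr'⟩
        · rintro ⟨c, hc, hcr⟩
          have hcne : c ≠ end_ := fun h => hev (h ▸ hfr c hc)
          obtain ⟨n, hadj, hnv, hcrn⟩ := pvCR_inv hcr hcne
          have hnnf : n ∈ nf := (hnf n).mpr ⟨hnv, c, hc, hadj⟩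
          have hcov : ∀ x, x ∈ v' → x ∈ visited ∨ x ∈ nf := fun x => (hv' x).mp
          rcases pvCR_addS nf hsubv hcov hcrn with h | ⟨s, hs, h⟩
          · refine ⟨n, hnnf, ?_⟩
            rw [hdk]
            exact h
          · refine ⟨s, hs, ?_⟩
            rw [hdk]
            exact h

-- ===== VERDICT (by name: the statement is the Claim_ definition above) =====
theorem is_path_between_py_spec : Claim_equal_is_path_between_py := by
  intro start end_ g maxd _
  unfold Spec_is_path_between_py is_path_between_py is_path_between_py_alt
  by_cases hse : start = end_
  · rw [if_pos hse, if_pos hse]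
  · rw [if_neg hse, if_neg hse]
    have hA := pvTA (g := g) (end_ := end_) (start := start) (maxd := maxd)
      (pvMA (pvBndA g) (pvUnivA start g) [(start, 0)] PySem.Set.empty + 1)
      [(start, 0)] PySem.Set.empty
      (Nat.lt_succ_self _)
      (by
        intro e he
        have : e = (start, 0) := by simpa using he
        rw [this]
        unfold pvUnivA
        exact (PySem.List.mem_dedup _ _).mpr List.mem_cons_self)
      List.not_mem_nil
      (by simp)
      (by
        intro a ha b hb
        have ha' : a = (start, 0) := by simpa using ha
        have hb' : b = (start, 0) := by simpa using hb
        rw [ha', hb']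
        omega)
    have hofl : PySem.Set.ofList [start] = [start] := rfl
    rw [hofl]
    have hB := pvTB (g := g) (end_ := end_) (maxd := maxd) maxd.toNat [start] [start]
      (by
        intro hmem
        have : end_ = start := by simpa using hmem
        exact hse this.symm)
      (fun x hx => hx)
    have hbr : (∃ e ∈ [((start : String), (0 : Int))], pvCR g end_ maxd PySem.Set.empty e.1 e.2)
        ↔ (∃ c ∈ [start], pvCR g end_ maxd [start] c (maxd - (maxd.toNat : Int))) := by
      constructor
      · rintro ⟨e, he, hcr⟩
        have he' : e = (start, 0) := by simpa using he
        rw [he'] at hcr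
        have hm : (0 : Int) ≤ maxd := pvCR_le hcr
        have ht : ((maxd.toNat : Int)) = maxd := Int.toNat_of_nonneg hm
        refine ⟨start, List.mem_cons_self, ?_⟩
        rw [ht, sub_self]
        have hsub : ∀ x, x ∈ (PySem.Set.empty : PySem.Set String) → x ∈ ([start] : PySem.Set String) :=
          fun x hx => absurd hx List.not_mem_nil
        have hcov : ∀ x, x ∈ ([start] : PySem.Set String) →
            x ∈ (PySem.Set.empty : PySem.Set String) ∨ x ∈ [start] := fun x hx => Or.inr hx
        rcases pvCR_addS [start] hsub hcov hcr with h | ⟨s, hs, h⟩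
        · exact h
        · have : s = start := by simpa using hs
          exact this ▸ h
      · rintro ⟨c, hc, hcr⟩
        have hc' : c = start := by simpa using hc
        rw [hc'] at hcr
        by_cases hm : (0 : Int) ≤ maxd
        · have ht : ((maxd.toNat : Int)) = maxd := Int.toNat_of_nonneg hm
          rw [ht, sub_self] at hcr
          have hsub : ∀ x, x ∈ (PySem.Set.empty : PySem.Set String) → x ∈ ([start] : PySem.Set String) :=
            fun x hx => absurd hx List.not_mem_nil
          exact ⟨(start, 0), List.mem_cons_self, pvCR_mono hsub hcr⟩
        · exfalso
          have ht : maxd.toNat = 0 := Int.toNat_of_nonpos (by omega)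
          rw [ht] at hcr
          simp only [Nat.cast_zero, sub_zero] at hcr
          obtain ⟨n, _, _, hcrn⟩ := pvCR_inv hcr hse
          have := pvCR_le hcrn
          omega
    exact Bool.coe_iff_coe.mp (hA.trans (hbr.trans hB.symm))
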